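-- pv_equiv track=rewrite | github.com/ivanKbyte/fourgameAI | aiplayer2.py | searching_win_move
-- ===== SOURCE A (Python) =====
-- rows = 6
--
-- cols = 7
--
-- def landing_place(board, col):
--     for r in range(rows):
--         if board[r][col] == 0:  #starts from buttom and first empty section will be the landing spot
--             return r
--     return -1
--
-- def win_move(board, piece):
--     for c in range(cols):
--         for r in range(rows - 3):
--             if board[r][c] == piece and board[r+1][c] == piece and board[r+2][c] == piece and board[r+3][c] == piece:
--                 return True
--     for r in range(rows):
--         for c in range(cols - 3):
--             if board[r][c] == piece and board[r][c+1] == piece and board[r][c+2] == piece and board[r][c+3] == piece: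
--                 return True
--
--     for r in range(3, rows):
--         for c in range(cols - 3):
--             if board[r][c] == piece and board[r-1][c+1] == piece and board[r-2][c+2] == piece and board[r-3][c+3] == piece:
--                 return True
--     for r in range(rows - 3):
--         for c in range(cols - 3):
--             if board[r][c] == piece and board[r+1][c+1] == piece and board[r+2][c+2] == piece and board[r+3][c+3] == piece:
--                 return True
--     return False
--
-- def searching_win_move(board, moves, me, opp):
--     for c in moves:
--         r = landing_place(board, c)
--         if r == -1:
--             continue
--
--         #making clone of board for move simulation
--         board_clone = [row[:] for row in board]
--         board_clone[r][c] = me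
--
--         #Finding this win move
--         if win_move(board_clone, me):
--             return c
--     return -1
-- ===== SOURCE B (Python) =====
-- rows = 6
-- cols = 7
--
-- def bitboard(board, pred):
--     # bit 7*c + r is set when pred holds at cell (r, c); bit row 6 of each
--     # column stays clear and acts as a guard against wrap-around.
--     bb = 0
--     for c in range(cols):
--         for r in range(rows):
--             if pred(board[r][c]):
--                 bb |= 1 << (7 * c + r)
--     return bb
--
-- def wins(bb):
--     # four-in-a-row in any direction via shift-and on the bitboard:
--     # strides 1 = vertical, 7 = horizontal, 6 = up-right diagonal, 8 = down-right diagonal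
--     for k in (1, 7, 6, 8):
--         d = bb & (bb >> k)
--         if d & (d >> (2 * k)):
--             return True
--     return False
--
-- def searching_win_move(board, moves, me, opp):
--     if not moves:
--         return -1
--     mine = bitboard(board, lambda v: v == me)
--     free = bitboard(board, lambda v: v == 0)
--     for c in moves:
--         r = next((r for r in range(rows) if free >> (7 * c + r) & 1), -1)
--         if r == -1:
--             continue
--         if wins(mine | 1 << (7 * c + r)):
--             return c
--     return -1
-- ===== Notes on version B (the rewrite author's own statement) =====
-- stated objective: alternative
-- what changed: B replaces A's clone-and-scan with a bitboard: the board is encoded once into two 49-bit integers (my pieces, free cells) with a guard row, landing rows are read off the free mask, and a win is detected by shift-and operations (bb & bb>>k twice, strides 1/7/6/8) instead of A's four nested window-scanning loops over a cloned 2-D list.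
import Mathlib
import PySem

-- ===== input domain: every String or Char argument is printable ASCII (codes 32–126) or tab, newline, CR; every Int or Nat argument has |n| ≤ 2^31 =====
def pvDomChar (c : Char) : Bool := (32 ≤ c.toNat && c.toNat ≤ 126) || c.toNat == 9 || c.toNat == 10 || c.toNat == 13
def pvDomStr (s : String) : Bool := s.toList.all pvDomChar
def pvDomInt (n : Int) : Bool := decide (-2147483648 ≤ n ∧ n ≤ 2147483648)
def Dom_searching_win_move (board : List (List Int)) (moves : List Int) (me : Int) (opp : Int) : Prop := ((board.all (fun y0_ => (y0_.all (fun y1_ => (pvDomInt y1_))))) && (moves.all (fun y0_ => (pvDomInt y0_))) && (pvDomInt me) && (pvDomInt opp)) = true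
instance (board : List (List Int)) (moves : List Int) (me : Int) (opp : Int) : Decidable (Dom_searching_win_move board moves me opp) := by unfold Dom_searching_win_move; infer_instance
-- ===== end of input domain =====

-- B replaces A's clone-and-scan win test by a bitboard: the board is encoded into two
-- 49-bit masks (pieces of `me`, free cells) and a win is detected by shift-and operations
-- (objective: alternative; equal return value proved on Pre_).


-- ===== PORT A =====
-- board[r][c], totalized with defaults; Pre_ keeps every used index in range, so the defaults never fire
def pvCellA (b : List (List Int)) (r c : Int) : Int :=
  PySem.List.pyGetD (PySem.List.pyGetD b r []) c 0

-- for r in range(rows): if board[r][col] == 0: return r // return -1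
def pvLandingA (b : List (List Int)) (col : Int) : Int :=
  (((PySem.List.pyRange 0 6 1).find? (fun r => pvCellA b r col == 0)).getD (-1))

-- the four loop nests of win_move, each 'for/for/if: return True', chained
def pvWinA (b : List (List Int)) (p : Int) : Bool :=
  ((PySem.List.pyRange 0 7 1).any fun c => (PySem.List.pyRange 0 3 1).any fun r =>
      pvCellA b r c == p && pvCellA b (r+1) c == p && pvCellA b (r+2) c == p && pvCellA b (r+3) c == p)
  || ((PySem.List.pyRange 0 6 1).any fun r => (PySem.List.pyRange 0 4 1).any fun c =>
      pvCellA b r c == p && pvCellA b r (c+1) == p && pvCellA b r (c+2) == p && pvCellA b r (c+3) == p)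
  || ((PySem.List.pyRange 3 6 1).any fun r => (PySem.List.pyRange 0 4 1).any fun c =>
      pvCellA b r c == p && pvCellA b (r-1) (c+1) == p && pvCellA b (r-2) (c+2) == p && pvCellA b (r-3) (c+3) == p)
  || ((PySem.List.pyRange 0 3 1).any fun r => (PySem.List.pyRange 0 4 1).any fun c =>
      pvCellA b r c == p && pvCellA b (r+1) (c+1) == p && pvCellA b (r+2) (c+2) == p && pvCellA b (r+3) (c+3) == p)

-- clone = [row[:] for row in board]; clone[r][c] = me  (copy is identity on pure lists)
def pvPlaceA (b : List (List Int)) (r c v : Int) : List (List Int) :=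
  PySem.List.pySetD b r (PySem.List.pySetD (PySem.List.pyGetD b r []) c v)

def searching_win_move (board : List (List Int)) (moves : List Int) (me : Int) (opp : Int) : Int :=
  match moves with
  | [] => -1
  | c :: rest =>
    let r := pvLandingA board c
    if r == -1 then searching_win_move board rest me opp
    else if pvWinA (pvPlaceA board r c me) me then c
    else searching_win_move board rest me opp

-- ===== PORT B =====
-- board[r][c] for the Nat loop counters of bitboard(); under Pre_ every access is in range
def pvCellB (b : List (List Int)) (r c : Nat) : Int :=
  (b.getD r []).getD c 0

-- bitboard(board, pred): bb |= 1 << (7*c + r); loop counters are the Nats 0..6 / 0..5,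
-- exactly Python's nonnegative range ints
def pvBitboard (b : List (List Int)) (pred : Int → Bool) : Nat :=
  (List.range 7).foldl (fun acc c =>
    (List.range 6).foldl (fun acc2 r =>
      if pred (pvCellB b r c) then acc2 ||| (1 <<< (7*c + r)) else acc2) acc) 0

-- wins(bb): for k in (1,7,6,8): d = bb & bb >> k; if d & d >> 2*k: return True
def pvWins (bb : Nat) : Bool :=
  [1, 7, 6, 8].any fun k =>
    (bb &&& (bb >>> k)) &&& ((bb &&& (bb >>> k)) >>> (2*k)) != 0

-- the move loop of B; (7*c + r).toNat is exact: Pre_ gives 0 ≤ c (and r ≥ 0 from range),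
-- where Python's shift would raise on a negative count
def pvGoB (mine free : Nat) (moves : List Int) : Int :=
  match moves with
  | [] => -1
  | c :: rest =>
    -- r = next((r for r in range(6) if free >> (7*c+r) & 1), -1)
    let r := (((PySem.List.pyRange 0 6 1).find? (fun r => free.testBit (7*c + r).toNat)).getD (-1))
    if r == -1 then pvGoB mine free rest
    else if pvWins (mine ||| (1 <<< (7*c + r).toNat)) then c
    else pvGoB mine free rest

def searching_win_move_alt (board : List (List Int)) (moves : List Int) (me : Int) (opp : Int) : Int :=
  match moves with
  | [] => -1
  | _ :: _ =>
    pvGoB (pvBitboard board (· == me)) (pvBitboard board (· == 0)) moves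

-- ===== PRECONDITION & SPEC =====
-- Pre_ restricts to the game's natural domain: columns 0..6 and (when a move is actually
-- played) a board with at least 6 rows of at least 7 cells; outside it A generally raises
-- IndexError, and the excluded inputs on which A still returns (negative wrap-around columns,
-- degenerate boards a lucky early win or an empty move list saves from the IndexError) are
-- outside the board game's natural domain.
def Pre_searching_win_move (board : List (List Int)) (moves : List Int) (me : Int) (opp : Int) : Prop :=
  (∀ c ∈ moves, 0 ≤ c ∧ c < 7) ∧
  (moves ≠ [] → 6 ≤ board.length ∧ ∀ row ∈ board.take 6, 7 ≤ row.length)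
instance (board : List (List Int)) (moves : List Int) (me : Int) (opp : Int) : Decidable (Pre_searching_win_move board moves me opp) := by unfold Pre_searching_win_move; infer_instance

def pvWitness_searching_win_move : List (List Int) × List Int × Int × Int :=
  ([[0,0,0,0,0,0,0],[0,0,0,0,0,0,0],[0,0,0,0,0,0,0],[0,0,0,0,0,0,0],[0,0,0,0,0,0,0],[1,2,0,0,0,0,0]], [3], 1, 2)

def Spec_searching_win_move (board : List (List Int)) (moves : List Int) (me : Int) (opp : Int) (out : Int) : Prop := out = searching_win_move_alt board moves me opp
instance (board : List (List Int)) (moves : List Int) (me : Int) (opp : Int) (out : Int) : Decidable (Spec_searching_win_move board moves me opp out) := by unfold Spec_searching_win_move; infer_instance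

-- ===== CLAIM (what is proved, stated in full; the proofs are below) =====
def Claim_equal_searching_win_move : Prop := ∀ (board : List (List Int)) (moves : List Int) (me : Int) (opp : Int), Dom_searching_win_move board moves me opp → Pre_searching_win_move board moves me opp → Spec_searching_win_move board moves me opp (searching_win_move board moves me opp)

-- ===== LEMMAS AND PROOFS =====

-- B's Nat-indexed cell accessor agrees with A's Int-indexed one on cast indices
lemma pv_cellB_eq (b : List (List Int)) (r c : Nat) :
    pvCellB b r c = pvCellA b (r : Int) (c : Int) := by
  simp [pvCellB, pvCellA]

-- a cell predicate lifted to a bit index: bit j of a bitboard means "valid position, predicate holds"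
def pvG (h : Int → Int → Bool) (j : Nat) : Prop :=
  j < 49 ∧ j % 7 < 6 ∧ h ((j % 7 : Nat) : Int) ((j / 7 : Nat) : Int) = true

-- a stride-k line of four set bits
def pvLine (t k : Nat) : Prop :=
  ∃ j : Nat, t.testBit j = true ∧ t.testBit (j+k) = true ∧ t.testBit (j+2*k) = true ∧ t.testBit (j+3*k) = true

-- the four window families of win_move as one predicate over a cell test
def pvWinProp (h : Int → Int → Bool) : Prop :=
  (∃ c : Int, 0 ≤ c ∧ c < 7 ∧ ∃ r : Int, 0 ≤ r ∧ r < 3 ∧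
    h r c = true ∧ h (r+1) c = true ∧ h (r+2) c = true ∧ h (r+3) c = true) ∨
  (∃ r : Int, 0 ≤ r ∧ r < 6 ∧ ∃ c : Int, 0 ≤ c ∧ c < 4 ∧
    h r c = true ∧ h r (c+1) = true ∧ h r (c+2) = true ∧ h r (c+3) = true) ∨
  (∃ r : Int, 3 ≤ r ∧ r < 6 ∧ ∃ c : Int, 0 ≤ c ∧ c < 4 ∧
    h r c = true ∧ h (r-1) (c+1) = true ∧ h (r-2) (c+2) = true ∧ h (r-3) (c+3) = true) ∨
  (∃ r : Int, 0 ≤ r ∧ r < 3 ∧ ∃ c : Int, 0 ≤ c ∧ c < 4 ∧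
    h r c = true ∧ h (r+1) (c+1) = true ∧ h (r+2) (c+2) = true ∧ h (r+3) (c+3) = true)

lemma pv_testBit_fold (Lr : List Nat) (p : Nat → Bool) (e : Nat → Nat) (acc j : Nat) :
    (Lr.foldl (fun a r => if p r then a ||| (1 <<< e r) else a) acc).testBit j
      = (acc.testBit j || Lr.any (fun r => p r && decide (e r = j))) := by
  induction Lr generalizing acc with
  | nil => simp
  | cons x xs ih =>
    simp only [List.foldl_cons, List.any_cons]
    rw [ih]
    by_cases hp : p x = true
    · simp [hp, Nat.testBit_or, Nat.one_shiftLeft, Nat.testBit_two_pow, Bool.or_assoc]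
    · simp [hp]

lemma pv_testBit_outer (b : List (List Int)) (pred : Int → Bool) (Lc : List Nat) (acc j : Nat) :
    (Lc.foldl (fun acc c =>
      (List.range 6).foldl (fun acc2 r =>
        if pred (pvCellB b r c) then acc2 ||| (1 <<< (7*c + r)) else acc2) acc) acc).testBit j
      = (acc.testBit j || Lc.any (fun c => (List.range 6).any
          (fun r => pred (pvCellB b r c) && decide (7*c + r = j)))) := by
  induction Lc generalizing acc with
  | nil => simp
  | cons x xs ih =>
    simp only [List.foldl_cons, List.any_cons]
    rw [ih, pv_testBit_fold, Bool.or_assoc]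

lemma pv_testBit_bitboard (b : List (List Int)) (pred : Int → Bool) (j : Nat) :
    (pvBitboard b pred).testBit j
      = ((decide (j < 49) && decide (j % 7 < 6)) && pred (pvCellA b ((j % 7 : Nat) : Int) ((j / 7 : Nat) : Int))) := by
  unfold pvBitboard
  rw [pv_testBit_outer]
  simp only [Nat.zero_testBit, Bool.false_or, pv_cellB_eq]
  rw [Bool.eq_iff_iff]
  simp only [List.any_eq_true, List.mem_range, Bool.and_eq_true, decide_eq_true_eq]
  constructor
  · rintro ⟨c, hc, r, hr, hp, he⟩
    have h1 : j % 7 = r := by omega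
    have h2 : j / 7 = c := by omega
    rw [h1, h2]
    exact ⟨⟨by omega, by omega⟩, hp⟩
  · rintro ⟨⟨h1, h2⟩, hp⟩
    exact ⟨j / 7, by omega, j % 7, by omega, hp, by omega⟩

lemma pv_shift_test (bb k : Nat) :
    ((bb &&& (bb >>> k)) &&& ((bb &&& (bb >>> k)) >>> (2*k)) ≠ 0) ↔ pvLine bb k := by
  unfold pvLine
  constructor
  · intro h
    obtain ⟨j, hj⟩ := Nat.exists_testBit_of_ne_zero h
    simp only [Nat.testBit_and, Nat.testBit_shiftRight, Bool.and_eq_true] at hj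
    obtain ⟨⟨h0, h1⟩, h2, h3⟩ := hj
    refine ⟨j, h0, by rwa [Nat.add_comm] at h1, by rwa [show 2*k + j = j + 2*k by omega] at h2,
      by rwa [show k + (2*k + j) = j + 3*k by omega] at h3⟩
  · rintro ⟨j, h0, h1, h2, h3⟩
    intro hz
    have hb : ((bb &&& (bb >>> k)) &&& ((bb &&& (bb >>> k)) >>> (2*k))).testBit j = true := by
      simp only [Nat.testBit_and, Nat.testBit_shiftRight, Bool.and_eq_true]
      refine ⟨⟨h0, by rwa [Nat.add_comm]⟩, by rwa [show 2*k + j = j + 2*k by omega], ?_⟩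
      rwa [show k + (2*k + j) = j + 3*k by omega]
    rw [hz, Nat.zero_testBit] at hb
    exact Bool.false_ne_true hb

lemma pv_wins_iff (t : Nat) :
    pvWins t = true ↔ (pvLine t 1 ∨ pvLine t 7 ∨ pvLine t 6 ∨ pvLine t 8) := by
  unfold pvWins
  simp only [List.any_cons, List.any_nil, Bool.or_false, Bool.or_eq_true, bne_iff_ne]
  rw [pv_shift_test t 1, pv_shift_test t 7, pv_shift_test t 6, pv_shift_test t 8]

lemma pv_find?_congr {α : Type} (l : List α) (p q : α → Bool) (h : ∀ x ∈ l, p x = q x) :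
    l.find? p = l.find? q := by
  induction l with
  | nil => rfl
  | cons x xs ih =>
    have hx := h x (by simp)
    simp only [List.find?_cons, hx]
    cases q x
    · exact ih fun y hy => h y (by simp [hy])
    · rfl

-- ----- the four direction lemmas: a stride-k bit line is exactly a win_move window -----

lemma pv_dir1 (t : Nat) (h : Int → Int → Bool) (ht : ∀ j, t.testBit j = true ↔ pvG h j) :
    pvLine t 1 ↔ (∃ c : Int, 0 ≤ c ∧ c < 7 ∧ ∃ r : Int, 0 ≤ r ∧ r < 3 ∧
      h r c = true ∧ h (r+1) c = true ∧ h (r+2) c = true ∧ h (r+3) c = true) := by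
  unfold pvLine
  simp only [ht]
  unfold pvG
  constructor
  · rintro ⟨j, ⟨ha1, ha2, hp0⟩, ⟨hb1, hb2, hp1⟩, ⟨hc1, hc2, hp2⟩, ⟨hd1, hd2, hp3⟩⟩
    refine ⟨(j / 7 : Nat), by omega, by omega, (j % 7 : Nat), by omega, by omega, hp0, ?_, ?_, ?_⟩
    · rwa [show ((((j+1) % 7 : Nat)) : Int) = ((j % 7 : Nat) : Int) + 1 by omega,
           show ((((j+1) / 7 : Nat)) : Int) = ((j / 7 : Nat) : Int) by omega] at hp1
    · rwa [show ((((j+2*1) % 7 : Nat)) : Int) = ((j % 7 : Nat) : Int) + 2 by omega,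
           show ((((j+2*1) / 7 : Nat)) : Int) = ((j / 7 : Nat) : Int) by omega] at hp2
    · rwa [show ((((j+3*1) % 7 : Nat)) : Int) = ((j % 7 : Nat) : Int) + 3 by omega,
           show ((((j+3*1) / 7 : Nat)) : Int) = ((j / 7 : Nat) : Int) by omega] at hp3
  · rintro ⟨c, hc0, hc7, r, hr0, hr3, hp0, hp1, hp2, hp3⟩
    refine ⟨7 * c.toNat + r.toNat, ⟨by omega, by omega, ?_⟩, ⟨by omega, by omega, ?_⟩,
      ⟨by omega, by omega, ?_⟩, ⟨by omega, by omega, ?_⟩⟩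
    · rwa [show ((((7*c.toNat+r.toNat) % 7 : Nat)) : Int) = r by omega,
           show ((((7*c.toNat+r.toNat) / 7 : Nat)) : Int) = c by omega]
    · rwa [show ((((7*c.toNat+r.toNat+1) % 7 : Nat)) : Int) = r + 1 by omega,
           show ((((7*c.toNat+r.toNat+1) / 7 : Nat)) : Int) = c by omega]
    · rwa [show ((((7*c.toNat+r.toNat+2*1) % 7 : Nat)) : Int) = r + 2 by omega,
           show ((((7*c.toNat+r.toNat+2*1) / 7 : Nat)) : Int) = c by omega]
    · rwa [show ((((7*c.toNat+r.toNat+3*1) % 7 : Nat)) : Int) = r + 3 by omega,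
           show ((((7*c.toNat+r.toNat+3*1) / 7 : Nat)) : Int) = c by omega]

lemma pv_dir7 (t : Nat) (h : Int → Int → Bool) (ht : ∀ j, t.testBit j = true ↔ pvG h j) :
    pvLine t 7 ↔ (∃ r : Int, 0 ≤ r ∧ r < 6 ∧ ∃ c : Int, 0 ≤ c ∧ c < 4 ∧
      h r c = true ∧ h r (c+1) = true ∧ h r (c+2) = true ∧ h r (c+3) = true) := by
  unfold pvLine
  simp only [ht]
  unfold pvG
  constructor
  · rintro ⟨j, ⟨ha1, ha2, hp0⟩, ⟨hb1, hb2, hp1⟩, ⟨hc1, hc2, hp2⟩, ⟨hd1, hd2, hp3⟩⟩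
    refine ⟨(j % 7 : Nat), by omega, by omega, (j / 7 : Nat), by omega, by omega, hp0, ?_, ?_, ?_⟩
    · rwa [show ((((j+7) % 7 : Nat)) : Int) = ((j % 7 : Nat) : Int) by omega,
           show ((((j+7) / 7 : Nat)) : Int) = ((j / 7 : Nat) : Int) + 1 by omega] at hp1
    · rwa [show ((((j+2*7) % 7 : Nat)) : Int) = ((j % 7 : Nat) : Int) by omega,
           show ((((j+2*7) / 7 : Nat)) : Int) = ((j / 7 : Nat) : Int) + 2 by omega] at hp2
    · rwa [show ((((j+3*7) % 7 : Nat)) : Int) = ((j % 7 : Nat) : Int) by omega,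
           show ((((j+3*7) / 7 : Nat)) : Int) = ((j / 7 : Nat) : Int) + 3 by omega] at hp3
  · rintro ⟨r, hr0, hr6, c, hc0, hc4, hp0, hp1, hp2, hp3⟩
    refine ⟨7 * c.toNat + r.toNat, ⟨by omega, by omega, ?_⟩, ⟨by omega, by omega, ?_⟩,
      ⟨by omega, by omega, ?_⟩, ⟨by omega, by omega, ?_⟩⟩
    · rwa [show ((((7*c.toNat+r.toNat) % 7 : Nat)) : Int) = r by omega,
           show ((((7*c.toNat+r.toNat) / 7 : Nat)) : Int) = c by omega]
    · rwa [show ((((7*c.toNat+r.toNat+7) % 7 : Nat)) : Int) = r by omega,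
           show ((((7*c.toNat+r.toNat+7) / 7 : Nat)) : Int) = c + 1 by omega]
    · rwa [show ((((7*c.toNat+r.toNat+2*7) % 7 : Nat)) : Int) = r by omega,
           show ((((7*c.toNat+r.toNat+2*7) / 7 : Nat)) : Int) = c + 2 by omega]
    · rwa [show ((((7*c.toNat+r.toNat+3*7) % 7 : Nat)) : Int) = r by omega,
           show ((((7*c.toNat+r.toNat+3*7) / 7 : Nat)) : Int) = c + 3 by omega]

lemma pv_dir6 (t : Nat) (h : Int → Int → Bool) (ht : ∀ j, t.testBit j = true ↔ pvG h j) :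
    pvLine t 6 ↔ (∃ r : Int, 3 ≤ r ∧ r < 6 ∧ ∃ c : Int, 0 ≤ c ∧ c < 4 ∧
      h r c = true ∧ h (r-1) (c+1) = true ∧ h (r-2) (c+2) = true ∧ h (r-3) (c+3) = true) := by
  unfold pvLine
  simp only [ht]
  unfold pvG
  constructor
  · rintro ⟨j, ⟨ha1, ha2, hp0⟩, ⟨hb1, hb2, hp1⟩, ⟨hc1, hc2, hp2⟩, ⟨hd1, hd2, hp3⟩⟩
    refine ⟨(j % 7 : Nat), by omega, by omega, (j / 7 : Nat), by omega, by omega, hp0, ?_, ?_, ?_⟩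
    · rwa [show ((((j+6) % 7 : Nat)) : Int) = ((j % 7 : Nat) : Int) - 1 by omega,
           show ((((j+6) / 7 : Nat)) : Int) = ((j / 7 : Nat) : Int) + 1 by omega] at hp1
    · rwa [show ((((j+2*6) % 7 : Nat)) : Int) = ((j % 7 : Nat) : Int) - 2 by omega,
           show ((((j+2*6) / 7 : Nat)) : Int) = ((j / 7 : Nat) : Int) + 2 by omega] at hp2
    · rwa [show ((((j+3*6) % 7 : Nat)) : Int) = ((j % 7 : Nat) : Int) - 3 by omega,
           show ((((j+3*6) / 7 : Nat)) : Int) = ((j / 7 : Nat) : Int) + 3 by omega] at hp3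
  · rintro ⟨r, hr3, hr6, c, hc0, hc4, hp0, hp1, hp2, hp3⟩
    refine ⟨7 * c.toNat + r.toNat, ⟨by omega, by omega, ?_⟩, ⟨by omega, by omega, ?_⟩,
      ⟨by omega, by omega, ?_⟩, ⟨by omega, by omega, ?_⟩⟩
    · rwa [show ((((7*c.toNat+r.toNat) % 7 : Nat)) : Int) = r by omega,
           show ((((7*c.toNat+r.toNat) / 7 : Nat)) : Int) = c by omega]
    · rwa [show ((((7*c.toNat+r.toNat+6) % 7 : Nat)) : Int) = r - 1 by omega,
           show ((((7*c.toNat+r.toNat+6) / 7 : Nat)) : Int) = c + 1 by omega]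
    · rwa [show ((((7*c.toNat+r.toNat+2*6) % 7 : Nat)) : Int) = r - 2 by omega,
           show ((((7*c.toNat+r.toNat+2*6) / 7 : Nat)) : Int) = c + 2 by omega]
    · rwa [show ((((7*c.toNat+r.toNat+3*6) % 7 : Nat)) : Int) = r - 3 by omega,
           show ((((7*c.toNat+r.toNat+3*6) / 7 : Nat)) : Int) = c + 3 by omega]

lemma pv_dir8 (t : Nat) (h : Int → Int → Bool) (ht : ∀ j, t.testBit j = true ↔ pvG h j) :
    pvLine t 8 ↔ (∃ r : Int, 0 ≤ r ∧ r < 3 ∧ ∃ c : Int, 0 ≤ c ∧ c < 4 ∧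
      h r c = true ∧ h (r+1) (c+1) = true ∧ h (r+2) (c+2) = true ∧ h (r+3) (c+3) = true) := by
  unfold pvLine
  simp only [ht]
  unfold pvG
  constructor
  · rintro ⟨j, ⟨ha1, ha2, hp0⟩, ⟨hb1, hb2, hp1⟩, ⟨hc1, hc2, hp2⟩, ⟨hd1, hd2, hp3⟩⟩
    refine ⟨(j % 7 : Nat), by omega, by omega, (j / 7 : Nat), by omega, by omega, hp0, ?_, ?_, ?_⟩
    · rwa [show ((((j+8) % 7 : Nat)) : Int) = ((j % 7 : Nat) : Int) + 1 by omega,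
           show ((((j+8) / 7 : Nat)) : Int) = ((j / 7 : Nat) : Int) + 1 by omega] at hp1
    · rwa [show ((((j+2*8) % 7 : Nat)) : Int) = ((j % 7 : Nat) : Int) + 2 by omega,
           show ((((j+2*8) / 7 : Nat)) : Int) = ((j / 7 : Nat) : Int) + 2 by omega] at hp2
    · rwa [show ((((j+3*8) % 7 : Nat)) : Int) = ((j % 7 : Nat) : Int) + 3 by omega,
           show ((((j+3*8) / 7 : Nat)) : Int) = ((j / 7 : Nat) : Int) + 3 by omega] at hp3
  · rintro ⟨r, hr0, hr3, c, hc0, hc4, hp0, hp1, hp2, hp3⟩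
    refine ⟨7 * c.toNat + r.toNat, ⟨by omega, by omega, ?_⟩, ⟨by omega, by omega, ?_⟩,
      ⟨by omega, by omega, ?_⟩, ⟨by omega, by omega, ?_⟩⟩
    · rwa [show ((((7*c.toNat+r.toNat) % 7 : Nat)) : Int) = r by omega,
           show ((((7*c.toNat+r.toNat) / 7 : Nat)) : Int) = c by omega]
    · rwa [show ((((7*c.toNat+r.toNat+8) % 7 : Nat)) : Int) = r + 1 by omega,
           show ((((7*c.toNat+r.toNat+8) / 7 : Nat)) : Int) = c + 1 by omega]
    · rwa [show ((((7*c.toNat+r.toNat+2*8) % 7 : Nat)) : Int) = r + 2 by omega,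
           show ((((7*c.toNat+r.toNat+2*8) / 7 : Nat)) : Int) = c + 2 by omega]
    · rwa [show ((((7*c.toNat+r.toNat+3*8) % 7 : Nat)) : Int) = r + 3 by omega,
           show ((((7*c.toNat+r.toNat+3*8) / 7 : Nat)) : Int) = c + 3 by omega]

-- pvWinA in window form
lemma pv_winA_iff (b : List (List Int)) (p : Int) :
    pvWinA b p = true ↔ pvWinProp (fun r c => pvCellA b r c == p) := by
  unfold pvWinA pvWinProp
  simp only [Bool.or_eq_true, List.any_eq_true, PySem.List.mem_pyRange_one,
    Bool.and_eq_true, and_assoc, or_assoc]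

-- pvWinProp only looks at cells with 0 ≤ r < 6, 0 ≤ c < 7
lemma pv_winProp_congr (h1 h2 : Int → Int → Bool)
    (hpt : ∀ r c : Int, 0 ≤ r → r < 6 → 0 ≤ c → c < 7 → h1 r c = h2 r c) :
    pvWinProp h1 ↔ pvWinProp h2 := by
  unfold pvWinProp
  constructor
  · rintro (⟨c, h1c, h2c, r, h1r, h2r, p0, p1, p2, p3⟩ | ⟨r, h1r, h2r, c, h1c, h2c, p0, p1, p2, p3⟩ |
      ⟨r, h1r, h2r, c, h1c, h2c, p0, p1, p2, p3⟩ | ⟨r, h1r, h2r, c, h1c, h2c, p0, p1, p2, p3⟩)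
    · exact Or.inl ⟨c, h1c, h2c, r, h1r, h2r,
        by rw [← hpt _ _ (by omega) (by omega) (by omega) (by omega)]; exact p0,
        by rw [← hpt _ _ (by omega) (by omega) (by omega) (by omega)]; exact p1,
        by rw [← hpt _ _ (by omega) (by omega) (by omega) (by omega)]; exact p2,
        by rw [← hpt _ _ (by omega) (by omega) (by omega) (by omega)]; exact p3⟩
    · exact Or.inr (Or.inl ⟨r, h1r, h2r, c, h1c, h2c,
        by rw [← hpt _ _ (by omega) (by omega) (by omega) (by omega)]; exact p0,
        by rw [← hpt _ _ (by omega) (by omega) (by omega) (by omega)]; exact p1,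
        by rw [← hpt _ _ (by omega) (by omega) (by omega) (by omega)]; exact p2,
        by rw [← hpt _ _ (by omega) (by omega) (by omega) (by omega)]; exact p3⟩)
    · exact Or.inr (Or.inr (Or.inl ⟨r, h1r, h2r, c, h1c, h2c,
        by rw [← hpt _ _ (by omega) (by omega) (by omega) (by omega)]; exact p0,
        by rw [← hpt _ _ (by omega) (by omega) (by omega) (by omega)]; exact p1,
        by rw [← hpt _ _ (by omega) (by omega) (by omega) (by omega)]; exact p2,
        by rw [← hpt _ _ (by omega) (by omega) (by omega) (by omega)]; exact p3⟩))
    · exact Or.inr (Or.inr (Or.inr ⟨r, h1r, h2r, c, h1c, h2c,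
        by rw [← hpt _ _ (by omega) (by omega) (by omega) (by omega)]; exact p0,
        by rw [← hpt _ _ (by omega) (by omega) (by omega) (by omega)]; exact p1,
        by rw [← hpt _ _ (by omega) (by omega) (by omega) (by omega)]; exact p2,
        by rw [← hpt _ _ (by omega) (by omega) (by omega) (by omega)]; exact p3⟩))
  · rintro (⟨c, h1c, h2c, r, h1r, h2r, p0, p1, p2, p3⟩ | ⟨r, h1r, h2r, c, h1c, h2c, p0, p1, p2, p3⟩ |
      ⟨r, h1r, h2r, c, h1c, h2c, p0, p1, p2, p3⟩ | ⟨r, h1r, h2r, c, h1c, h2c, p0, p1, p2, p3⟩)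
    · exact Or.inl ⟨c, h1c, h2c, r, h1r, h2r,
        by rw [hpt _ _ (by omega) (by omega) (by omega) (by omega)]; exact p0,
        by rw [hpt _ _ (by omega) (by omega) (by omega) (by omega)]; exact p1,
        by rw [hpt _ _ (by omega) (by omega) (by omega) (by omega)]; exact p2,
        by rw [hpt _ _ (by omega) (by omega) (by omega) (by omega)]; exact p3⟩
    · exact Or.inr (Or.inl ⟨r, h1r, h2r, c, h1c, h2c,
        by rw [hpt _ _ (by omega) (by omega) (by omega) (by omega)]; exact p0,
        by rw [hpt _ _ (by omega) (by omega) (by omega) (by omega)]; exact p1,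
        by rw [hpt _ _ (by omega) (by omega) (by omega) (by omega)]; exact p2,
        by rw [hpt _ _ (by omega) (by omega) (by omega) (by omega)]; exact p3⟩)
    · exact Or.inr (Or.inr (Or.inl ⟨r, h1r, h2r, c, h1c, h2c,
        by rw [hpt _ _ (by omega) (by omega) (by omega) (by omega)]; exact p0,
        by rw [hpt _ _ (by omega) (by omega) (by omega) (by omega)]; exact p1,
        by rw [hpt _ _ (by omega) (by omega) (by omega) (by omega)]; exact p2,
        by rw [hpt _ _ (by omega) (by omega) (by omega) (by omega)]; exact p3⟩))
    · exact Or.inr (Or.inr (Or.inr ⟨r, h1r, h2r, c, h1c, h2c,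
        by rw [hpt _ _ (by omega) (by omega) (by omega) (by omega)]; exact p0,
        by rw [hpt _ _ (by omega) (by omega) (by omega) (by omega)]; exact p1,
        by rw [hpt _ _ (by omega) (by omega) (by omega) (by omega)]; exact p2,
        by rw [hpt _ _ (by omega) (by omega) (by omega) (by omega)]; exact p3⟩))

-- row-length fact used below
lemma pv_row_len (b : List (List Int)) (hlen : 6 ≤ b.length)
    (hrow : ∀ row ∈ b.take 6, 7 ≤ row.length) (i : Nat) (hi : i < 6) :
    7 ≤ (b[i]'(by omega)).length := by
  apply hrow
  have h1 : i < (b.take 6).length := by simp; omega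
  have h2 : (b.take 6)[i]'h1 = b[i]'(by omega) := List.getElem_take
  rw [← h2]
  exact List.getElem_mem h1

-- placing a piece changes exactly one cell (both coordinates in range)
lemma pv_cell_place (b : List (List Int)) (r c v r' c' : Int)
    (hr : 0 ≤ r) (hr6 : r < 6) (hc : 0 ≤ c) (hc7 : c < 7)
    (hr' : 0 ≤ r') (hr6' : r' < 6) (hc' : 0 ≤ c') (hc7' : c' < 7)
    (hlen : 6 ≤ b.length) (hrow : ∀ row ∈ b.take 6, 7 ≤ row.length) :
    pvCellA (pvPlaceA b r c v) r' c' =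
      if r' = r ∧ c' = c then v else pvCellA b r' c' := by
  have hbr : r.toNat < b.length := by omega
  have hbr' : r'.toNat < b.length := by omega
  have hrl : 7 ≤ (b[r.toNat]'hbr).length := pv_row_len b hlen hrow r.toNat (by omega)
  have hrl' : 7 ≤ (b[r'.toNat]'hbr').length := pv_row_len b hlen hrow r'.toNat (by omega)
  unfold pvCellA pvPlaceA
  rw [PySem.List.pySetD_of_nonneg _ _ hr, PySem.List.pySetD_of_nonneg _ _ hc]
  rw [PySem.List.pyGetD_eq_getElem _ _ hr (by omega),
      PySem.List.pyGetD_eq_getElem _ _ hr' (by push_cast [List.length_set]; omega),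
      PySem.List.pyGetD_eq_getElem _ _ hr' (by omega)]
  rw [List.getElem_set]
  by_cases hrr : r.toNat = r'.toNat
  · rw [if_pos hrr]
    simp only [hrr]
    rw [PySem.List.pyGetD_eq_getElem _ _ hc' (by push_cast [List.length_set]; omega),
        PySem.List.pyGetD_eq_getElem _ _ hc' (by omega)]
    rw [List.getElem_set]
    have hvr : r' = r := by omega
    by_cases hcc : c.toNat = c'.toNat
    · rw [if_pos hcc]
      have hvc : c' = c := by omega
      rw [if_pos ⟨hvr, hvc⟩]
    · rw [if_neg hcc]
      have hvc : ¬ (r' = r ∧ c' = c) := fun hx => hcc (by omega)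
      rw [if_neg hvc]
  · rw [if_neg hrr]
    have hnr : ¬ (r' = r ∧ c' = c) := fun hx => hrr (by omega)
    rw [if_neg hnr]

-- bit j of (mine | 1 << (7c+r)) reads the board-after-move cell predicate
lemma pv_tbit (b : List (List Int)) (me r c : Int)
    (hr : 0 ≤ r) (hr6 : r < 6) (hc : 0 ≤ c) (hc7 : c < 7) (j : Nat) :
    ((pvBitboard b (· == me)) ||| (1 <<< (7*c + r).toNat)).testBit j = true ↔
      pvG (fun r' c' => (pvCellA b r' c' == me) || (decide (r' = r) && decide (c' = c))) j := by
  rw [Nat.testBit_or, pv_testBit_bitboard]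
  have hone : (1 <<< (7*c + r).toNat).testBit j = decide ((7*c + r).toNat = j) := by
    rw [Nat.one_shiftLeft, Nat.testBit_two_pow]
  rw [hone]
  unfold pvG
  simp only [Bool.or_eq_true, Bool.and_eq_true, decide_eq_true_eq, beq_iff_eq]
  constructor
  · rintro (⟨⟨h1, h2⟩, h3⟩ | hj)
    · exact ⟨by omega, by omega, Or.inl h3⟩
    · refine ⟨by omega, by omega, Or.inr ⟨by omega, by omega⟩⟩
  · rintro ⟨h1, h2, (h3 | ⟨h4, h5⟩)⟩
    · exact Or.inl ⟨⟨by omega, by omega⟩, h3⟩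
    · exact Or.inr (by omega)

-- the central fact: A's scan of the cloned board equals B's shift-and test
lemma pv_win_eq (b : List (List Int)) (me r c : Int)
    (hr : 0 ≤ r) (hr6 : r < 6) (hc : 0 ≤ c) (hc7 : c < 7)
    (hlen : 6 ≤ b.length) (hrow : ∀ row ∈ b.take 6, 7 ≤ row.length) :
    pvWinA (pvPlaceA b r c me) me = pvWins ((pvBitboard b (· == me)) ||| (1 <<< (7*c + r).toNat)) := by
  rw [Bool.eq_iff_iff, pv_winA_iff, pv_wins_iff]
  have ht := pv_tbit b me r c hr hr6 hc hc7
  rw [pv_dir1 _ _ ht, pv_dir7 _ _ ht, pv_dir6 _ _ ht, pv_dir8 _ _ ht]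
  have hpt : ∀ r' c' : Int, 0 ≤ r' → r' < 6 → 0 ≤ c' → c' < 7 →
      (pvCellA (pvPlaceA b r c me) r' c' == me)
        = ((pvCellA b r' c' == me) || (decide (r' = r) && decide (c' = c))) := by
    intro r' c' h1 h2 h3 h4
    rw [pv_cell_place b r c me r' c' hr hr6 hc hc7 h1 h2 h3 h4 hlen hrow]
    by_cases hif : r' = r ∧ c' = c
    · simp [hif.1, hif.2]
    · rw [if_neg hif]
      rcases not_and_or.mp hif with h | h <;> simp [h]
  exact pv_winProp_congr _ _ hpt

-- landing predicate: bit (7c+r) of the free mask is "cell (r,c) is 0"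
lemma pv_landing_eq (b : List (List Int)) (c : Int) (hc : 0 ≤ c) (hc7 : c < 7) :
    pvLandingA b c =
      (((PySem.List.pyRange 0 6 1).find? (fun r => (pvBitboard b (· == 0)).testBit (7*c + r).toNat)).getD (-1)) := by
  unfold pvLandingA
  rw [pv_find?_congr _ _ (fun r => (pvBitboard b (· == 0)).testBit (7*c + r).toNat)]
  intro r hrm
  rw [PySem.List.mem_pyRange_one] at hrm
  rw [pv_testBit_bitboard]
  have e0 : decide ((7*c + r).toNat < 49) = true := by simp; omega
  have e1 : decide ((7*c + r).toNat % 7 < 6) = true := by simp; omega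
  have e2 : ((((7*c + r).toNat % 7 : Nat)) : Int) = r := by omega
  have e3 : ((((7*c + r).toNat / 7 : Nat)) : Int) = c := by omega
  rw [e0, e1, e2, e3]
  simp

-- the move loop: A's recursion equals B's bit loop
lemma pv_aux (b : List (List Int)) (me opp : Int)
    (hlen : 6 ≤ b.length) (hrow : ∀ row ∈ b.take 6, 7 ≤ row.length) :
    ∀ moves : List Int, (∀ c ∈ moves, 0 ≤ c ∧ c < 7) →
      searching_win_move b moves me opp = pvGoB (pvBitboard b (· == me)) (pvBitboard b (· == 0)) moves := by
  intro moves
  induction moves with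
  | nil => intro _; rfl
  | cons c rest ih =>
    intro hm
    obtain ⟨hc0, hc7⟩ := hm c (by simp)
    have hrest : ∀ x ∈ rest, 0 ≤ x ∧ x < 7 := fun x hx => hm x (by simp [hx])
    simp only [searching_win_move, pvGoB]
    rw [← pv_landing_eq b c hc0 hc7]
    set r := pvLandingA b c with hrdef
    by_cases hneg : r == -1
    · rw [if_pos hneg, if_pos hneg, ih hrest]
    · rw [if_neg hneg, if_neg hneg]
      have hrb : 0 ≤ r ∧ r < 6 := by
        unfold pvLandingA at hrdef
        cases hf : (PySem.List.pyRange 0 6 1).find? (fun x => pvCellA b x c == 0) with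
        | none => rw [hf] at hrdef; simp at hrdef; simp [hrdef] at hneg
        | some rv =>
          have := List.mem_of_find?_eq_some hf
          rw [PySem.List.mem_pyRange_one] at this
          rw [hf] at hrdef; simp at hrdef; omega
      rw [pv_win_eq b me r c hrb.1 hrb.2 hc0 hc7 hlen hrow]
      by_cases hw : pvWins ((pvBitboard b (· == me)) ||| (1 <<< (7*c + r).toNat)) = true
      · rw [if_pos hw, if_pos hw]
      · rw [if_neg hw, if_neg hw, ih hrest]

-- ===== VERDICT (by name: the statement is the Claim_ definition above) =====
theorem searching_win_move_spec : Claim_equal_searching_win_move := by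
  intro board moves me opp _ hpre
  unfold Spec_searching_win_move
  match moves with
  | [] => rfl
  | c :: rest =>
    obtain ⟨hm, hshape⟩ := hpre
    obtain ⟨hlen, hrow⟩ := hshape (by simp)
    unfold searching_win_move_alt
    exact pv_aux board me opp hlen hrow (c :: rest) hm
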